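-- pv_equiv track=rewrite | github.com/DIEGO-LEE-24/Coding_Test_Algorithm | 밀라/백준_12026_BOJ 거리.py | min_energy_to_meet
-- ===== SOURCE A (Python) =====
-- def min_energy_to_meet(N, blocks):
--     dp = [float('inf')] * N  # dp 배열 크기를 N으로 설정
--     dp[0] = 0  # 첫 번째 블록 도달 비용은 0
--
--     target_sequence = "BOJ"
--
--     for i in range(N):
--         if dp[i] == float('inf'):
--             continue
--
--         for j in range(i + 1, N):
--             expected_char = target_sequence[(j - 1) % 3]
--             if blocks[j] == expected_char:
--                 jump_distance = j - i
--                 dp[j] = min(dp[j], dp[i] + jump_distance * jump_distance)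
--
--     return dp[N - 1] if dp[N - 1] != float('inf') else -1  # 마지막 블록에 대한 결과
-- ===== SOURCE B (Python) =====
-- def min_energy_to_meet(N, blocks):
--     # Greedy one pass: stopping at every pattern-matching block is always optimal
--     # because (j-i)^2 >= (m-i)^2 + (j-m)^2 for i < m < j.
--     if N == 1:
--         return 0
--     total = 0
--     prev = 0
--     for j in range(1, N):
--         if blocks[j] == "BOJ"[(j - 1) % 3]:
--             total += (j - prev) ** 2
--             prev = j
--     return total if prev == N - 1 else -1
-- ===== Notes on version B (the rewrite author's own statement) =====
-- stated objective: faster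
-- what changed: Replaced A's O(N^2) all-pairs DP relaxation over a dp array by a single O(N) greedy pass that stops at every pattern-matching block (exact since (j-i)^2 >= (m-i)^2 + (j-m)^2 for i<m<j), keeping only (total, last position).
-- outside the precondition, e.g. on min_energy_to_meet(0, 'B'): A raises IndexError, B returns -1; on min_energy_to_meet(3, 'BO'): A raises IndexError, B raises IndexError
import Mathlib
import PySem

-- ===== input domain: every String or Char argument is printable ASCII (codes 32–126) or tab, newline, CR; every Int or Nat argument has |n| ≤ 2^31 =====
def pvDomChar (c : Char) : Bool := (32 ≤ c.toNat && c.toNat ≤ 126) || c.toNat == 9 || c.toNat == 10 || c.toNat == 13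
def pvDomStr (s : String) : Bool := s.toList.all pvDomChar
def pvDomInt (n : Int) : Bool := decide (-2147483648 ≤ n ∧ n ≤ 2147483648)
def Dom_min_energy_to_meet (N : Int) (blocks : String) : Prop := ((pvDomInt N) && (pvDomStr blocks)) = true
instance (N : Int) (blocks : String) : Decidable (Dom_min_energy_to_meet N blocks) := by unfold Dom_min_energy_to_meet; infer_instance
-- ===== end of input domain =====

-- B replaces A's O(N^2) double DP loop by a single greedy pass (stop at every matching block),
-- exact because (j-i)^2 ≥ (m-i)^2 + (j-m)^2 for i < m < j; measured asymptotically faster.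

-- ===== PORT A =====
-- the test  blocks[j] == "BOJ"[(j - 1) % 3]  appearing verbatim in both Python versions
def pvCond (blocks : String) (j : Int) : Bool :=
  (PySem.Str.pyGet? blocks j).getD ' ' == (PySem.Str.pyGet? "BOJ" (PySem.Int.mod (j - 1) 3)).getD ' '

-- Python min(inf, x) with none = float('inf')
def pvOptMin : Option Int → Int → Option Int
  | none, b => some b
  | some a, b => some (min a b)

-- body of A's inner 'for j in range(i+1, N)' loop
def pvAInner (blocks : String) (i di : Int) (dp : List (Option Int)) (j : Int) : List (Option Int) :=
  if pvCond blocks j then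
    let jd := j - i
    dp.set j.toNat (pvOptMin (dp.getD j.toNat none) (di + jd * jd))
  else dp

-- body of A's outer 'for i in range(N)' loop (the 'continue' is the none branch)
def pvAOuter (blocks : String) (N : Int) (dp : List (Option Int)) (i : Int) : List (Option Int) :=
  match dp.getD i.toNat none with
  | none => dp
  | some di => (PySem.List.pyRange (i + 1) N 1).foldl (pvAInner blocks i di) dp

def min_energy_to_meet (N : Int) (blocks : String) : Int :=
  let dp0 := (List.replicate N.toNat (none : Option Int)).set 0 (some 0)
  let dp := (PySem.List.pyRange 0 N 1).foldl (pvAOuter blocks N) dp0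
  match dp.getD (N - 1).toNat none with
  | some v => v
  | none => -1

-- ===== PORT B =====
-- body of B's single 'for j in range(1, N)' loop; state = (total, prev)
def pvBStep (blocks : String) (st : Int × Int) (j : Int) : Int × Int :=
  if pvCond blocks j then (st.1 + (j - st.2) ^ 2, j) else st

def min_energy_to_meet_alt (N : Int) (blocks : String) : Int :=
  if N = 1 then 0
  else
    let st := (PySem.List.pyRange 1 N 1).foldl (pvBStep blocks) (0, 0)
    if st.2 = N - 1 then st.1 else -1

-- ===== PRECONDITION & SPEC =====
-- Pre_ excludes exactly the inputs where Python A raises IndexError: N ≤ 0 (dp[0] = 0 on an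
-- empty list) and 2 ≤ N > len(blocks) (blocks[j] for some j ≤ N-1).
def Pre_min_energy_to_meet (N : Int) (blocks : String) : Prop :=
  1 ≤ N ∧ (N = 1 ∨ N ≤ (blocks.toList.length : Int))
instance (N : Int) (blocks : String) : Decidable (Pre_min_energy_to_meet N blocks) := by
  unfold Pre_min_energy_to_meet; infer_instance

def pvWitness_min_energy_to_meet : Int × String := (3, "BOJ")

def Spec_min_energy_to_meet (N : Int) (blocks : String) (out : Int) : Prop := out = min_energy_to_meet_alt N blocks
instance (N : Int) (blocks : String) (out : Int) : Decidable (Spec_min_energy_to_meet N blocks out) := by unfold Spec_min_energy_to_meet; infer_instance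

-- ===== CLAIM (what is proved, stated in full; the proofs are below) =====
def Claim_equal_min_energy_to_meet : Prop := ∀ (N : Int) (blocks : String), Dom_min_energy_to_meet N blocks → Pre_min_energy_to_meet N blocks → Spec_min_energy_to_meet N blocks (min_energy_to_meet N blocks)

-- ===== LEMMAS AND PROOFS =====

-- B's greedy state after scanning positions 1..j, as a Nat recursion: (total, last matching position)
def pvG (blocks : String) : Nat → Int × Nat
  | 0 => (0, 0)
  | j+1 => if pvCond blocks ((j : Int) + 1)
      then ((pvG blocks j).1 + (((j : Int) + 1) - ((pvG blocks j).2 : Int)) ^ 2, j + 1)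
      else pvG blocks j

-- A's dp[j] after outer iterations 0..i: min over predecessors p ≤ min(i, j-1), p = 0 or matching
def pvM (blocks : String) : Nat → Nat → Int
  | 0, j => (j : Int) ^ 2
  | i+1, j => if pvCond blocks ((i : Int) + 1) && decide (i + 1 < j)
      then min (pvM blocks i j) ((pvG blocks (i+1)).1 + ((j : Int) - ((i : Int) + 1)) ^ 2)
      else pvM blocks i j

-- the dp list after outer iterations 0..i
def pvDpSpec (blocks : String) (n i : Nat) : List (Option Int) :=
  (List.range n).map (fun (j : Nat) =>
    if j = 0 then some 0
    else if pvCond blocks (j : Int) then some (pvM blocks i j) else none)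

theorem pvG_snd_le (blocks : String) (j : Nat) : (pvG blocks j).2 ≤ j := by
  induction j with
  | zero => simp [pvG]
  | succ k ih =>
    simp only [pvG]
    split
    · exact le_refl _
    · exact le_trans ih (Nat.le_succ k)

theorem pvG_snd_valid (blocks : String) (j : Nat) :
    (pvG blocks j).2 = 0 ∨ pvCond blocks ((pvG blocks j).2 : Int) = true := by
  induction j with
  | zero => left; simp [pvG]
  | succ k ih =>
    simp only [pvG]
    split
    · right
      rename_i h
      push_cast
      exact h
    · exact ih

theorem pvG_fix (blocks : String) (j : Nat) : pvG blocks ((pvG blocks j).2) = pvG blocks j := by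
  induction j with
  | zero => simp [pvG]
  | succ k ih =>
    by_cases h : pvCond blocks ((k : Int) + 1) = true
    · simp [pvG, h]
    · simp only [pvG, if_neg h]
      exact ih

theorem pvG_snd_max (blocks : String) (j p : Nat) (hpj : p ≤ j) (hp : 0 < p)
    (hc : pvCond blocks (p : Int) = true) : p ≤ (pvG blocks j).2 := by
  induction j with
  | zero => omega
  | succ k ih =>
    by_cases h : pvCond blocks ((k : Int) + 1) = true
    · simp only [pvG, if_pos h]
      exact hpj
    · simp only [pvG, if_neg h]
      rcases Nat.lt_or_ge p (k+1) with hlt | hge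
      · exact ih (by omega)
      · exfalso
        have hpk : p = k + 1 := by omega
        apply h
        have : ((p : Nat) : Int) = (k : Int) + 1 := by rw [hpk]; push_cast; ring
        rwa [this] at hc

-- any single jump from an admissible predecessor costs at least the greedy chain
theorem pvKey (blocks : String) (j : Nat) (hj : pvCond blocks (j : Int) = true)
    (p : Nat) (hpj : p < j) (hp : p = 0 ∨ pvCond blocks (p : Int) = true) :
    (pvG blocks j).1 ≤ (pvG blocks p).1 + ((j : Int) - (p : Int)) ^ 2 := by
  induction j using Nat.strong_induction_on generalizing p with
  | _ j ih =>
    obtain ⟨k, rfl⟩ : ∃ k, j = k + 1 := ⟨j - 1, by omega⟩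
    have hj' : pvCond blocks ((k : Int) + 1) = true := by
      have : ((k + 1 : Nat) : Int) = (k : Int) + 1 := by push_cast; ring
      rwa [this] at hj
    -- unfold the last greedy step
    have hG : pvG blocks (k+1)
        = ((pvG blocks k).1 + (((k : Int) + 1) - ((pvG blocks k).2 : Int)) ^ 2, k + 1) := by
      simp [pvG, hj']
    set q := (pvG blocks k).2 with hqdef
    have hqk : q ≤ k := pvG_snd_le blocks k
    have hfix : pvG blocks q = pvG blocks k := pvG_fix blocks k
    have hpq : p ≤ q := by
      rcases hp with h0 | hval
      · omega
      · rcases Nat.eq_zero_or_pos p with h0 | hppos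
        · omega
        · exact pvG_snd_max blocks k p (by omega) hppos hval
    rcases Nat.eq_or_lt_of_le hpq with heq | hlt
    · -- p = q : the greedy step itself
      rw [hG]
      simp only [heq]
      rw [hfix]
      push_cast
      nlinarith [sq_nonneg ((k : Int) + 1 - (q : Int))]
    · -- p < q : q is a valid position, use the IH at q
      have hqpos : 0 < q := by omega
      have hqval : pvCond blocks ((q : Int)) = true := by
        rcases pvG_snd_valid blocks k with h0 | hv
        · omega
        · exact hv
      have hIH : (pvG blocks q).1 ≤ (pvG blocks p).1 + ((q : Int) - (p : Int)) ^ 2 :=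
        ih q (by omega) hqval p hlt hp
      rw [hG]
      simp only
      rw [hfix] at hIH
      have h1 : ((p : Int)) ≤ (q : Int) := by exact_mod_cast hpq
      have h2 : ((q : Int)) ≤ (k : Int) := by exact_mod_cast hqk
      push_cast
      nlinarith [mul_nonneg (by omega : (0:Int) ≤ (k : Int) + 1 - (q : Int))
        (by omega : (0:Int) ≤ (q : Int) - (p : Int))]

theorem pvM_le_term (blocks : String) (i j p : Nat) (hpi : p ≤ i) (hpj : p < j)
    (hp : p = 0 ∨ pvCond blocks (p : Int) = true) :
    pvM blocks i j ≤ (pvG blocks p).1 + ((j : Int) - (p : Int)) ^ 2 := by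
  induction i with
  | zero =>
    have : p = 0 := by omega
    subst this
    simp [pvM, pvG]
  | succ k ih =>
    rcases Nat.lt_or_ge p (k+1) with hlt | hge
    · -- p ≤ k : the term is already bounded in pvM k j
      have h1 := ih (by omega)
      simp only [pvM]
      split
      · exact le_trans (min_le_left _ _) h1
      · exact h1
    · -- p = k+1 : the new term is taken into the min
      have hpk : p = k + 1 := by omega
      subst hpk
      have hval : pvCond blocks ((k : Int) + 1) = true := by
        rcases hp with h0 | hv
        · omega
        · have : ((k + 1 : Nat) : Int) = (k : Int) + 1 := by push_cast; ring
          rwa [this] at hv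
      have hcond : (pvCond blocks ((k : Int) + 1) && decide (k + 1 < j)) = true := by
        simp [hval, hpj]
      simp only [pvM, hcond, if_pos]
      refine le_trans (min_le_right _ _) ?_
      push_cast
      exact le_refl _

theorem pvG_le_M (blocks : String) (i j : Nat) (hj : 0 < j) (hc : pvCond blocks (j : Int) = true) :
    (pvG blocks j).1 ≤ pvM blocks i j := by
  induction i with
  | zero =>
    have := pvKey blocks j hc 0 hj (Or.inl rfl)
    simpa [pvM, pvG] using this
  | succ k ih =>
    simp only [pvM]
    split
    · rename_i h
      simp only [Bool.and_eq_true, decide_eq_true_eq] at h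
      refine le_min ih ?_
      have hval : pvCond blocks ((k + 1 : Nat) : Int) = true := by
        push_cast
        exact h.1
      have := pvKey blocks j hc (k+1) h.2 (Or.inr hval)
      push_cast at this ⊢
      exact this
    · exact ih

theorem pvM_eq_G (blocks : String) (i k : Nat) (hc : pvCond blocks ((k : Int) + 1) = true)
    (hik : k ≤ i) : pvM blocks i (k+1) = (pvG blocks (k+1)).1 := by
  have hc' : pvCond blocks ((k + 1 : Nat) : Int) = true := by push_cast; exact hc
  refine le_antisymm ?_ (pvG_le_M blocks i (k+1) (by omega) hc')
  -- the term for p = (pvG k).2 equals the greedy value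
  set q := (pvG blocks k).2 with hqdef
  have hqk : q ≤ k := pvG_snd_le blocks k
  have hfix : pvG blocks q = pvG blocks k := pvG_fix blocks k
  have hterm := pvM_le_term blocks i (k+1) q (by omega) (by omega) (pvG_snd_valid blocks k)
  have hG : (pvG blocks (k+1)).1
      = (pvG blocks q).1 + (((k + 1 : Nat) : Int) - (q : Int)) ^ 2 := by
    simp only [pvG, if_pos hc]
    rw [hfix]
    push_cast
    ring
  rw [hG]
  exact hterm

-- B's fold over range(1, m+1) computes pvG m
theorem pvB_fold (blocks : String) (m : Nat) :
    (PySem.List.pyRange 1 ((m : Int) + 1) 1).foldl (pvBStep blocks) (0, 0)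
      = ((pvG blocks m).1, ((pvG blocks m).2 : Int)) := by
  induction m with
  | zero =>
    rw [PySem.List.pyRange_one_eq_nil (by omega)]
    simp [pvG]
  | succ m ih =>
    have hsplit : PySem.List.pyRange 1 (((m + 1 : Nat) : Int) + 1) 1
        = PySem.List.pyRange 1 ((m : Int) + 1) 1 ++ [(m : Int) + 1] := by
      have h1 : ((m + 1 : Nat) : Int) + 1 = ((m : Int) + 1) + 1 := by push_cast; ring
      rw [h1]
      exact PySem.List.pyRange_one_succ_right (by omega)
    rw [hsplit, List.foldl_append, ih]
    simp only [List.foldl]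
    by_cases h : pvCond blocks ((m : Int) + 1) = true
    · simp [pvBStep, h, pvG]
    · simp [pvBStep, h, pvG]

theorem pvAInner_length (blocks : String) (i di : Int) (dp : List (Option Int)) (j : Int) :
    (pvAInner blocks i di dp j).length = dp.length := by
  unfold pvAInner
  split <;> simp

theorem pvInner_fold_length (blocks : String) (i di : Int) (js : List Int)
    (dp : List (Option Int)) : (js.foldl (pvAInner blocks i di) dp).length = dp.length := by
  induction js generalizing dp with
  | nil => rfl
  | cons a t ih => rw [List.foldl_cons, ih, pvAInner_length]

theorem pvListEq {l1 l2 : List (Option Int)} (h : l1.length = l2.length)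
    (hk : ∀ k : Nat, l1.getD k none = l2.getD k none) : l1 = l2 := by
  apply List.ext_getElem h
  intro k h1 h2
  have := hk k
  rwa [List.getD_eq_getElem l1 none h1, List.getD_eq_getElem l2 none h2] at this

theorem pvDpSpec_length (blocks : String) (n i : Nat) : (pvDpSpec blocks n i).length = n := by
  simp [pvDpSpec]

def pvEntry (blocks : String) (n i k : Nat) : Option Int :=
  if k < n then
    (if k = 0 then some 0
     else if pvCond blocks (k : Int) then some (pvM blocks i k) else none)
  else none

theorem pvDpSpec_getD (blocks : String) (n i k : Nat) :
    (pvDpSpec blocks n i).getD k none = pvEntry blocks n i k := by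
  unfold pvDpSpec pvEntry
  rw [List.getD_eq_getElem?_getD, List.getElem?_map]
  by_cases h : k < n
  · simp [List.getElem?_range h, h]
  · rw [List.getElem?_eq_none (by simpa using h)]
    simp [h]

theorem pvEntry_zero (blocks : String) (n i : Nat) (h : 0 < n) :
    pvEntry blocks n i 0 = some 0 := by
  unfold pvEntry
  rw [if_pos h, if_pos rfl]

theorem pvEntry_val (blocks : String) (n i k : Nat) (h0 : 0 < k) (hk : k < n)
    (hc : pvCond blocks (k : Int) = true) :
    pvEntry blocks n i k = some (pvM blocks i k) := by
  unfold pvEntry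
  rw [if_pos hk, if_neg (by omega), if_pos hc]

theorem pvEntry_inv (blocks : String) (n i k : Nat) (h0 : 0 < k) (hk : k < n)
    (hc : ¬ pvCond blocks (k : Int) = true) :
    pvEntry blocks n i k = none := by
  unfold pvEntry
  rw [if_pos hk, if_neg (by omega), if_neg hc]

theorem pvEntry_ge (blocks : String) (n i k : Nat) (hk : ¬ k < n) :
    pvEntry blocks n i k = none := by
  unfold pvEntry
  rw [if_neg hk]

theorem pvM_stable (blocks : String) (i j : Nat) (h : ¬ (pvCond blocks ((i : Int) + 1) && decide (i + 1 < j)) = true) :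
    pvM blocks (i+1) j = pvM blocks i j := by
  simp only [pvM, if_neg h]

theorem pvM_step (blocks : String) (i j : Nat) (hc : pvCond blocks ((i : Int) + 1) = true)
    (hj : i + 1 < j) :
    pvM blocks (i+1) j = min (pvM blocks i j) ((pvG blocks (i+1)).1 + ((j : Int) - ((i : Int) + 1)) ^ 2) := by
  simp only [pvM, hc, hj, decide_true, Bool.and_self, if_pos]

theorem pvInner_getD (blocks : String) (i di : Int) (a b : Int) (ha : 0 ≤ a)
    (dp : List (Option Int)) (hb : b ≤ (dp.length : Int)) (k : Nat) :
    ((PySem.List.pyRange a b 1).foldl (pvAInner blocks i di) dp).getD k none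
      = if a ≤ (k : Int) ∧ (k : Int) < b ∧ pvCond blocks (k : Int) = true
        then pvOptMin (dp.getD k none) (di + ((k : Int) - i) * ((k : Int) - i))
        else dp.getD k none := by
  obtain ⟨n, hn⟩ : ∃ n, (b - a).toNat = n := ⟨_, rfl⟩
  induction n generalizing a dp with
  | zero =>
    rw [PySem.List.pyRange_one_eq_nil (by omega)]
    simp only [List.foldl_nil]
    rw [if_neg (by rintro ⟨h1, h2, _⟩; omega)]
  | succ n ih =>
    have hab : a < b := by omega
    rw [PySem.List.pyRange_one_cons hab, List.foldl_cons]
    have hstep : ∀ k' : Nat, (pvAInner blocks i di dp a).getD k' none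
        = if (k' : Int) = a ∧ pvCond blocks a = true
          then pvOptMin (dp.getD k' none) (di + (a - i) * (a - i))
          else dp.getD k' none := by
      intro k'
      by_cases hc : pvCond blocks a = true
      · simp only [pvAInner, if_pos hc]
        by_cases hk : (k' : Int) = a
        · have hk' : k' = a.toNat := by omega
          have hlt : a.toNat < dp.length := by omega
          rw [if_pos ⟨hk, hc⟩, hk']
          rw [List.getD_eq_getElem _ _ (by simpa using hlt),
            List.getElem_set_self, List.getD_eq_getElem _ _ hlt]
        · rw [if_neg (by tauto)]
          have hkne : k' ≠ a.toNat := by omega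
          rw [List.getD_eq_getElem?_getD, List.getElem?_set_ne (by omega),
            ← List.getD_eq_getElem?_getD]
      · simp only [pvAInner, if_neg hc]
        rw [if_neg (by tauto)]
    rw [ih (a + 1) (by omega) (pvAInner blocks i di dp a)
      (by rw [pvAInner_length]; exact hb) (by omega)]
    by_cases hka : (k : Int) = a
    · have houter : ¬(a + 1 ≤ (k : Int) ∧ (k : Int) < b ∧ pvCond blocks (k : Int) = true) := by
        rintro ⟨h, _⟩; omega
      rw [if_neg houter, hstep k]
      by_cases hc : pvCond blocks (k : Int) = true
      · rw [if_pos (show (k : Int) = a ∧ pvCond blocks a = true from ⟨hka, by rw [← hka]; exact hc⟩), if_pos ⟨by omega, by omega, hc⟩, ← hka]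
      · rw [if_neg (show ¬((k : Int) = a ∧ pvCond blocks a = true) from by rintro ⟨h1, h2⟩; rw [← h1] at h2; exact hc h2), if_neg (by tauto)]
    · rw [hstep k, if_neg (show ¬((k : Int) = a ∧ pvCond blocks a = true) from fun h => hka h.1)]
      have hiff : (a + 1 ≤ (k : Int) ∧ (k : Int) < b ∧ pvCond blocks (k : Int) = true)
          ↔ (a ≤ (k : Int) ∧ (k : Int) < b ∧ pvCond blocks (k : Int) = true) := by
        constructor <;> rintro ⟨h1, h2, h3⟩ <;> exact ⟨by omega, h2, h3⟩
      simp only [hiff]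

-- the outer loop invariant
theorem pvOuter_spec (blocks : String) (n : Nat) (hn : 1 ≤ n) (i : Nat) (hi : i < n) :
    (PySem.List.pyRange 0 ((i : Int) + 1) 1).foldl (pvAOuter blocks (n : Int))
        ((List.replicate n (none : Option Int)).set 0 (some 0))
      = pvDpSpec blocks n i := by
  induction i with
  | zero =>
    simp only [Nat.cast_zero, zero_add]
    rw [PySem.List.pyRange_one_cons (by omega : (0:Int) < 1),
      PySem.List.pyRange_one_eq_nil (show (1:Int) ≤ 0 + 1 by omega)]
    simp only [List.foldl_cons, List.foldl_nil]
    set dp0 := (List.replicate n (none : Option Int)).set 0 (some 0) with hdp0def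
    have hlen0 : dp0.length = n := by simp [hdp0def]
    have hdp0 : ∀ k : Nat, dp0.getD k none = if k = 0 ∧ k < n then some 0 else none := by
      intro k
      by_cases hk : k < n
      · rw [List.getD_eq_getElem _ _ (by omega)]
        rcases Nat.eq_zero_or_pos k with rfl | hpos
        · rw [if_pos ⟨rfl, hk⟩]
          simp [hdp0def, List.getElem_set]
        · rw [if_neg (by omega)]
          simp only [hdp0def, List.getElem_set, List.getElem_replicate,
            if_neg (show ¬0 = k by omega)]
      · rw [if_neg (by omega), List.getD_eq_getElem?_getD, List.getElem?_eq_none (by omega)]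
        rfl
    unfold pvAOuter
    rw [show ((0:Int).toNat) = 0 from rfl, hdp0 0, if_pos ⟨rfl, by omega⟩]
    refine pvListEq ?_ ?_
    · rw [pvInner_fold_length, hlen0, pvDpSpec_length]
    · intro k
      rw [pvInner_getD blocks 0 0 (0+1) (n : Int) (by omega) dp0 (by rw [hlen0]) k,
        pvDpSpec_getD]
      by_cases hk : k < n
      · rcases Nat.eq_zero_or_pos k with rfl | hpos
        · rw [if_neg (by push_cast; rintro ⟨h, _⟩; omega), pvEntry_zero blocks n 0 hk,
            hdp0 0, if_pos ⟨rfl, hk⟩]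
        · by_cases hc : pvCond blocks (k : Int) = true
          · rw [if_pos ⟨by push_cast; omega, by push_cast; omega, hc⟩,
              pvEntry_val blocks n 0 k hpos hk hc, hdp0 k, if_neg (by omega)]
            simp only [pvOptMin, pvM]
            congr 1
            ring
          · rw [if_neg (by tauto), pvEntry_inv blocks n 0 k hpos hk hc, hdp0 k,
              if_neg (by omega)]
      · rw [if_neg (by push_cast; rintro ⟨_, h, _⟩; omega), pvEntry_ge blocks n 0 k hk,
          hdp0 k, if_neg (by omega)]
  | succ i ih =>
    have hi' : i < n := by omega
    have hsplit : PySem.List.pyRange 0 (((i+1 : Nat) : Int) + 1) 1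
        = PySem.List.pyRange 0 ((i : Int) + 1) 1 ++ [(i : Int) + 1] := by
      have h1 : ((i + 1 : Nat) : Int) + 1 = ((i : Int) + 1) + 1 := by push_cast; ring
      rw [h1]
      exact PySem.List.pyRange_one_succ_right (by omega)
    rw [hsplit, List.foldl_append, ih hi']
    simp only [List.foldl_cons, List.foldl_nil]
    have htoNat : ((i : Int) + 1).toNat = i + 1 := by omega
    by_cases hc : pvCond blocks ((i : Int) + 1) = true
    · have hc' : pvCond blocks ((i+1 : Nat) : Int) = true := by push_cast; exact hc
      have hread : (pvDpSpec blocks n i).getD ((i : Int) + 1).toNat none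
          = some (pvM blocks i (i+1)) := by
        rw [htoNat, pvDpSpec_getD, pvEntry_val blocks n i (i+1) (by omega) hi hc']
      unfold pvAOuter
      rw [hread]
      refine pvListEq ?_ ?_
      · rw [pvInner_fold_length, pvDpSpec_length, pvDpSpec_length]
      · intro k
        rw [pvInner_getD blocks ((i : Int) + 1) (pvM blocks i (i+1)) (((i : Int) + 1) + 1)
            (n : Int) (by omega) _ (by rw [pvDpSpec_length]) k,
          pvDpSpec_getD, pvDpSpec_getD]
        by_cases hk : k < n
        · rcases Nat.eq_zero_or_pos k with rfl | hpos
          · rw [if_neg (by push_cast; rintro ⟨h, _⟩; omega), pvEntry_zero blocks n i hk,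
              pvEntry_zero blocks n (i+1) hk]
          · by_cases hck : pvCond blocks (k : Int) = true
            · by_cases hik : i + 1 < k
              · rw [if_pos ⟨by push_cast; omega, by push_cast; omega, hck⟩,
                  pvEntry_val blocks n i k hpos hk hck,
                  pvEntry_val blocks n (i+1) k hpos hk hck,
                  pvM_step blocks i k hc hik,
                  pvM_eq_G blocks i i hc (le_refl i)]
                simp only [pvOptMin]
                congr 2
                ring
              · rw [if_neg (by push_cast; rintro ⟨h, _⟩; omega),
                  pvEntry_val blocks n i k hpos hk hck,
                  pvEntry_val blocks n (i+1) k hpos hk hck,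
                  pvM_stable blocks i k (by simp [hik])]
            · rw [if_neg (by tauto), pvEntry_inv blocks n i k hpos hk hck,
                pvEntry_inv blocks n (i+1) k hpos hk hck]
        · rw [if_neg (by push_cast; rintro ⟨_, h, _⟩; omega), pvEntry_ge blocks n i k hk,
            pvEntry_ge blocks n (i+1) k hk]
    · have hc' : ¬ pvCond blocks ((i+1 : Nat) : Int) = true := by push_cast; exact hc
      have hread : (pvDpSpec blocks n i).getD ((i : Int) + 1).toNat none = none := by
        rw [htoNat, pvDpSpec_getD, pvEntry_inv blocks n i (i+1) (by omega) hi hc']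
      unfold pvAOuter
      rw [hread]
      unfold pvDpSpec
      refine List.map_congr_left ?_
      intro j hj
      by_cases hj0 : j = 0
      · simp [hj0]
      · rw [if_neg hj0, if_neg hj0]
        by_cases hcj : pvCond blocks (j : Int) = true
        · rw [if_pos hcj, if_pos hcj, pvM_stable blocks i j (by simp [hc])]
        · rw [if_neg hcj, if_neg hcj]

-- ===== VERDICT (by name: the statement is the Claim_ definition above) =====
theorem min_energy_to_meet_spec : Claim_equal_min_energy_to_meet := by
  intro N blocks _ hpre
  obtain ⟨h1, _⟩ := hpre
  obtain ⟨n, rfl⟩ : ∃ n : Nat, N = (n : Int) := ⟨N.toNat, by omega⟩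
  have hn : 1 ≤ n := by exact_mod_cast h1
  have houter := pvOuter_spec blocks n hn (n-1) (by omega)
  have hcast : ((n - 1 : Nat) : Int) + 1 = (n : Int) := by omega
  rw [hcast] at houter
  simp only [Spec_min_energy_to_meet, min_energy_to_meet, min_energy_to_meet_alt,
    Int.toNat_natCast]
  rw [houter]
  by_cases h1' : n = 1
  · subst h1'
    rw [show (((1:Nat) : Int) - 1).toNat = 0 from by norm_num, pvDpSpec_getD,
      pvEntry_zero blocks 1 0 (by omega)]
    norm_num
  · have hn2 : 2 ≤ n := by omega
    rw [show (((n:Nat) : Int) - 1).toNat = n - 1 from by omega, pvDpSpec_getD]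
    rw [if_neg (show ¬((n:Nat):Int) = 1 from by omega)]
    rw [show PySem.List.pyRange 1 ((n:Nat) : Int) 1
        = PySem.List.pyRange 1 (((n-1 : Nat) : Int) + 1) 1 from by rw [hcast],
      pvB_fold blocks (n-1)]
    by_cases hc : pvCond blocks ((n-1 : Nat) : Int) = true
    · rw [pvEntry_val blocks n (n-1) (n-1) (by omega) (by omega) hc]
      have hc' : pvCond blocks (((n - 2 : Nat) : Int) + 1) = true := by
        have h : ((n - 2 : Nat) : Int) + 1 = ((n - 1 : Nat) : Int) := by omega
        rw [h]; exact hc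
      have hM : pvM blocks (n-1) (n-1) = (pvG blocks (n-1)).1 := by
        rw [show n - 1 = (n - 2) + 1 from by omega]
        exact pvM_eq_G blocks ((n-2)+1) (n-2) hc' (by omega)
      rw [hM]
      have hptr : (pvG blocks (n-1)).2 = n - 1 :=
        le_antisymm (pvG_snd_le _ _) (pvG_snd_max blocks (n-1) (n-1) (le_refl _) (by omega) hc)
      rw [hptr, if_pos (show ((n-1:Nat):Int) = ((n:Nat):Int) - 1 from by omega)]
    · rw [pvEntry_inv blocks n (n-1) (n-1) (by omega) (by omega) hc]
      have hptr : ¬ (((pvG blocks (n-1)).2 : Int) = ((n:Nat):Int) - 1) := by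
        intro h
        have h2 : (pvG blocks (n-1)).2 = n - 1 := by omega
        rcases pvG_snd_valid blocks (n-1) with h0 | hv
        · omega
        · rw [h2] at hv; exact hc hv
      rw [if_neg hptr]
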